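-- pv_equiv track=rewrite | github.com/Iamsdt/Problem-Solving | course/youtube/validanagram.py | validAnagramBinary
-- ===== SOURCE A (Python) =====
-- def find_start(arr, t):
--     if arr[0] == t: return 0
--
--     low = 0
--     high = len(arr) -1
--     mid = 0
--     while high >= low:
--         mid = (high + low) // 2
--         if arr[mid] > t:
--             high = mid - 1
--         elif arr[mid] < t:
--             low = mid + 1
--         elif arr[mid] == t:
--             return mid
--
--     return -1
--
-- def validAnagramBinary(arr, t):
--     start = find_start(arr, t)
--     if start == -1 or arr[start] != t:
--         return [-1, -1]
--
--     end = -1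
--
--     for i in range(start, len(arr)):
--         if arr[i] != t:
--             break
--         end = i
--
--     return [start, end]
-- ===== SOURCE B (Python) =====
-- def _search(arr, t, low, size):
--     # binary search over (low, size) window; same probe sequence as a (low, high) search
--     if size <= 0:
--         return -1
--     half = (size - 1) // 2
--     mid = low + half
--     if arr[mid] < t:
--         return _search(arr, t, mid + 1, size - half - 1)
--     if arr[mid] > t:
--         return _search(arr, t, low, half)
--     return mid
--
--
-- def validAnagramBinary(arr, t):
--     start = 0 if arr[0] == t else _search(arr, t, 0, len(arr))
--     if start < 0:
--         return [-1, -1]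
--     run = 0
--     for x in arr[start:]:
--         if x != t:
--             break
--         run += 1
--     return [start, start + run - 1]
-- ===== Notes on version B (the rewrite author's own statement) =====
-- stated objective: alternative
-- what changed: B recasts the search as recursion over a (low, size) window with Nat sizes and mid = low + (size-1)//2 (provably the same probe sequence as A's (low, high) while-loop with its -1 sentinel), and computes the run end as start + length of the run counted by iterating over the slice arr[start:] instead of A's index loop re-assigning an 'end' accumulator; A's dead 'arr[start] != t' guard is dropped.
import Mathlib
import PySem

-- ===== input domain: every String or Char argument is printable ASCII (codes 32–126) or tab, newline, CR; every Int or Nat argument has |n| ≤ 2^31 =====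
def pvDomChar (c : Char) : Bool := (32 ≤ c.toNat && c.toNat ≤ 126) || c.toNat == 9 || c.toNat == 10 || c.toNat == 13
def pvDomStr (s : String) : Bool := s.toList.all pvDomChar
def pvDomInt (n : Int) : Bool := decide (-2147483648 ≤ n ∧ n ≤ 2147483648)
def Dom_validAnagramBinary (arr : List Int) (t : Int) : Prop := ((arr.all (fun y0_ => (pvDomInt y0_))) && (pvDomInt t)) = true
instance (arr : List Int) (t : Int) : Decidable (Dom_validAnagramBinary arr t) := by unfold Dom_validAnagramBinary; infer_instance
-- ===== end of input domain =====

-- B replaces A's (low, high)-with--1-sentinel while-loop by recursion on a (low, size) window with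
-- probe index low + (size-1)//2 (the same probe sequence), and A's index/accumulator end-scan by
-- counting the run of t's over the slice arr[start:] (objective: alternative).
-- Both loops are written with a Nat fuel parameter as the totality guard; the fuel passed at each
-- call site (arr.length + 1) exceeds the loop's iteration count, so the 0-fuel arm is never reached.

-- ===== PORT A =====
-- the while-loop of find_start; arr[mid] is always in range there (0 ≤ low and high ≤ len-1 are
-- maintained and mid lies between them), so the .getD 0 default is never consulted
def findStartLoop (arr : List Int) (t : Int) : Nat → Int → Int → Int
  | 0, _, _ => -1
  | fuel + 1, low, high =>
    if high ≥ low then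
      let mid := PySem.Int.floordiv (high + low) 2
      let v := (PySem.List.pyGet? arr mid).getD 0
      if v > t then findStartLoop arr t fuel low (mid - 1)
      else if v < t then findStartLoop arr t fuel (mid + 1) high
      else mid
    else -1

-- find_start; on arr = [] Python raises IndexError at arr[0] (excluded by Pre_)
def findStart (arr : List Int) (t : Int) : Int :=
  if PySem.List.pyGet? arr 0 = some t then 0
  else findStartLoop arr t (arr.length + 1) 0 ((PySem.List.len arr) - 1)

-- the for-loop over range(start, len(arr)) with break, carrying the 'end' accumulator
def scanEnd (arr : List Int) (t : Int) : Nat → Int → Int → Int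
  | 0, _, endAcc => endAcc
  | fuel + 1, i, endAcc =>
    if i < PySem.List.len arr then
      if PySem.List.pyGet? arr i ≠ some t then endAcc
      else scanEnd arr t fuel (i + 1) i
    else endAcc

def validAnagramBinary (arr : List Int) (t : Int) : List Int :=
  let start := findStart arr t
  if start = -1 ∨ PySem.List.pyGet? arr start ≠ some t then [-1, -1]
  else [start, scanEnd arr t (arr.length + 1) start (-1)]

-- ===== PORT B =====
-- Source B's _search over the window (low, size), half = (size-1)//2 inlined; the probed index
-- low + half is in range whenever low + size ≤ len arr (as at every call Source B makes), so
-- List.getD is exact there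
def searchB (arr : List Int) (t : Int) : Nat → Nat → Nat → Int
  | 0, _, _ => -1
  | fuel + 1, low, size =>
    if size = 0 then -1
    else if arr.getD (low + (size - 1) / 2) 0 < t then
      searchB arr t fuel (low + (size - 1) / 2 + 1) (size - (size - 1) / 2 - 1)
    else if t < arr.getD (low + (size - 1) / 2) 0 then
      searchB arr t fuel low ((size - 1) / 2)
    else Int.ofNat (low + (size - 1) / 2)

-- run = number of leading t's of the slice (for x in arr[start:]: break on mismatch, run += 1)
def runLen (t : Int) : List Int → Nat
  | [] => 0
  | x :: xs => if x = t then runLen t xs + 1 else 0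

-- arr[start:] for 0 ≤ start is List.drop start (exact: Source B only slices with start ≥ 0)
def validAnagramBinary_alt (arr : List Int) (t : Int) : List Int :=
  let start : Int := if arr.getD 0 0 = t then 0 else searchB arr t (arr.length + 1) 0 arr.length
  if start < 0 then [-1, -1]
  else [start, start + Int.ofNat (runLen t (arr.drop start.toNat)) - 1]

-- ===== PRECONDITION & SPEC =====
-- Pre_ excludes only arr = [], where both Pythons raise IndexError at arr[0].
def Pre_validAnagramBinary (arr : List Int) (t : Int) : Prop := arr ≠ []
instance (arr : List Int) (t : Int) : Decidable (Pre_validAnagramBinary arr t) := by unfold Pre_validAnagramBinary; infer_instance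
def pvWitness_validAnagramBinary : List Int × Int := ([1, 2, 2, 3], 2)

def Spec_validAnagramBinary (arr : List Int) (t : Int) (out : List Int) : Prop := out = validAnagramBinary_alt arr t
instance (arr : List Int) (t : Int) (out : List Int) : Decidable (Spec_validAnagramBinary arr t out) := by unfold Spec_validAnagramBinary; infer_instance

-- ===== CLAIM (what is proved, stated in full; the proofs are below) =====
def Claim_equal_validAnagramBinary : Prop := ∀ (arr : List Int) (t : Int), Dom_validAnagramBinary arr t → Pre_validAnagramBinary arr t → Spec_validAnagramBinary arr t (validAnagramBinary arr t)

-- ===== LEMMAS AND PROOFS =====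

-- A's midpoint (high+low)//2 at low = nl, high = nl+ns-1 is B's nl + (ns-1)/2
theorem mid_eq (nl ns : Nat) (h : 0 < ns) :
    PySem.Int.floordiv (((nl : Int) + (ns : Int) - 1) + (nl : Int)) 2
      = ((nl + (ns - 1) / 2 : Nat) : Int) := by
  rw [PySem.Int.floordiv_eq_ediv_of_pos (by omega)]
  have h2 : ((ns - 1) / 2 : Nat) * 2 ≤ ns - 1 ∧ ns - 1 < ((ns - 1) / 2 : Nat) * 2 + 2 := by omega
  push_cast
  omega

-- A's (low, high) loop is B's (low, size) recursion under low = nl, high = nl + ns - 1,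
-- for any two sufficient fuels
theorem findStartLoop_eq_searchB (arr : List Int) (t : Int) :
    ∀ ns : Nat, ∀ f g nl : Nat, ns < f → ns < g →
    findStartLoop arr t f (nl : Int) ((nl : Int) + (ns : Int) - 1) = searchB arr t g nl ns := by
  intro ns
  induction ns using Nat.strong_induction_on with
  | _ ns ih =>
    intro f g nl hf hg
    obtain ⟨f', rfl⟩ : ∃ f', f = f' + 1 := ⟨f - 1, by omega⟩
    obtain ⟨g', rfl⟩ : ∃ g', g = g' + 1 := ⟨g - 1, by omega⟩
    rcases Nat.eq_zero_or_pos ns with h0 | hpos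
    · subst h0
      rw [findStartLoop, searchB,
          if_neg (show ¬ (nl:Int) + (0:Nat) - 1 ≥ (nl:Int) by omega), if_pos rfl]
    · rw [findStartLoop, if_pos (show (nl:Int) + (ns:Nat) - 1 ≥ (nl:Int) by omega),
          searchB, if_neg (show ¬ ns = 0 by omega)]
      simp only [mid_eq nl ns hpos]
      have hv : (PySem.List.pyGet? arr ((nl + (ns - 1) / 2 : Nat) : Int)).getD 0
          = arr.getD (nl + (ns - 1) / 2) 0 := by
        rw [PySem.List.pyGet?_natCast, List.getD_eq_getElem?_getD]
      rw [hv]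
      set half := (ns - 1) / 2 with hhalf
      set v := arr.getD (nl + half) 0 with hvdef
      rcases lt_trichotomy v t with hlt | heq | hgt
      · rw [if_neg (show ¬ v > t by omega), if_pos hlt, if_pos (show v < t from hlt)]
        have := ih (ns - half - 1) (by omega) f' g' (nl + half + 1) (by omega) (by omega)
        rw [← this]
        congr 1
        push_cast; omega
      · rw [if_neg (show ¬ v > t by omega), if_neg (show ¬ v < t by omega),
            if_neg (show ¬ v < t by omega), if_neg (show ¬ t < v by omega)]
        simp [Int.ofNat_eq_natCast]
      · rw [if_pos hgt, if_neg (show ¬ v < t by omega), if_pos (show t < v from hgt)]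
        have := ih half (by omega) f' g' nl (by omega) (by omega)
        rw [← this]
        congr 1

-- a successful search lands in range on the target value
theorem searchB_some (arr : List Int) (t : Int) :
    ∀ size fuel low : Nat, size < fuel → low + size ≤ arr.length →
    searchB arr t fuel low size ≠ -1 →
    ∃ m : Nat, searchB arr t fuel low size = (m : Int) ∧ m < arr.length ∧ PySem.List.pyGet? arr (m : Int) = some t := by
  intro size
  induction size using Nat.strong_induction_on with
  | _ size ih =>
    intro fuel low hfu hle hne
    obtain ⟨fu, rfl⟩ : ∃ fu, fuel = fu + 1 := ⟨fuel - 1, by omega⟩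
    rw [searchB] at hne ⊢
    by_cases h0 : size = 0
    · rw [if_pos h0] at hne; exact absurd rfl hne
    · rw [if_neg h0] at hne ⊢
      rcases lt_trichotomy (arr.getD (low + (size - 1) / 2) 0) t with hlt | heq | hgt
      · rw [if_pos hlt] at hne ⊢
        exact ih (size - (size - 1) / 2 - 1) (by omega) fu (low + (size - 1) / 2 + 1) (by omega) (by omega) hne
      · rw [if_neg (show ¬ arr.getD (low + (size - 1) / 2) 0 < t by omega),
            if_neg (show ¬ t < arr.getD (low + (size - 1) / 2) 0 by omega)] at hne ⊢
        have hm : low + (size - 1) / 2 < arr.length := by omega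
        refine ⟨low + (size - 1) / 2, by simp [Int.ofNat_eq_natCast], hm, ?_⟩
        rw [PySem.List.pyGet?_natCast, List.getElem?_eq_getElem hm]
        rw [List.getD_eq_getElem _ _ hm] at heq
        simp [heq]
      · rw [if_neg (show ¬ arr.getD (low + (size - 1) / 2) 0 < t by omega),
            if_pos hgt] at hne ⊢
        exact ih ((size - 1) / 2) (by omega) fu low (by omega) (by omega) hne

-- A's accumulator loop, entered at j with endAcc = j - 1, equals B's run-length count
theorem scanEnd_eq_runLen (arr : List Int) (t : Int) :
    ∀ fuel j : Nat, arr.length - j < fuel →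
    scanEnd arr t fuel (j : Int) ((j : Int) - 1) = (j : Int) + (runLen t (arr.drop j) : Int) - 1 := by
  intro fuel
  induction fuel with
  | zero => intro j hj; omega
  | succ fu ihk =>
    intro j hj
    by_cases hlt : j < arr.length
    · have hget : PySem.List.pyGet? arr (j : Int) = some arr[j] := by
        rw [PySem.List.pyGet?_natCast, List.getElem?_eq_getElem hlt]
      rw [scanEnd, if_pos (by simp [PySem.List.len_eq]; omega),
          List.drop_eq_getElem_cons hlt]
      by_cases hx : arr[j] = t
      · rw [if_neg (by simp [hget, hx])]
        have := ihk (j + 1) (by omega)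
        push_cast at this ⊢
        rw [show (j : Int) + 1 - 1 = (j : Int) by ring] at this
        rw [this, runLen, if_pos hx]
        push_cast; ring
      · rw [if_pos (by simp [hget, hx]), runLen, if_neg hx]
        simp
    · rw [scanEnd, if_neg (by simp [PySem.List.len_eq]; omega),
          List.drop_eq_nil_of_le (by omega)]
      simp [runLen]

-- entering the scan at a position holding t (endAcc = -1 is overwritten on the first step)
theorem scanEnd_start (arr : List Int) (t : Int) (m fuel : Nat)
    (hmlt : m < arr.length) (hfu : arr.length - m < fuel)
    (hget : PySem.List.pyGet? arr (m : Int) = some t) :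
    scanEnd arr t fuel (m : Int) (-1) = (m : Int) + (runLen t (arr.drop m) : Int) - 1 := by
  obtain ⟨fu, rfl⟩ : ∃ fu, fuel = fu + 1 := ⟨fuel - 1, by omega⟩
  rw [scanEnd, if_pos (by simp [PySem.List.len_eq]; omega), if_neg (by simp [hget])]
  have h := scanEnd_eq_runLen arr t fu (m + 1) (by omega)
  push_cast at h
  rw [show (m : Int) + 1 - 1 = (m : Int) by ring] at h
  rw [h, List.drop_eq_getElem_cons hmlt, runLen,
      if_pos (by rw [PySem.List.pyGet?_natCast, List.getElem?_eq_getElem hmlt] at hget; simpa using hget)]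
  push_cast; ring

theorem validAnagramBinary_eq_alt (arr : List Int) (t : Int) (hpre : arr ≠ []) :
    validAnagramBinary arr t = validAnagramBinary_alt arr t := by
  obtain ⟨x, xs, rfl⟩ : ∃ x xs, arr = x :: xs := by
    cases arr with
    | nil => exact absurd rfl hpre
    | cons x xs => exact ⟨x, xs, rfl⟩
  set arr := x :: xs with harr
  have hlen : 0 < arr.length := by simp [harr]
  have hget0 : PySem.List.pyGet? arr 0 = some x := by simp [harr]
  have hgetD0 : arr.getD 0 0 = x := by simp [harr]
  unfold validAnagramBinary validAnagramBinary_alt findStart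
  by_cases h0 : x = t
  · subst h0
    rw [if_pos (show PySem.List.pyGet? arr 0 = some x from hget0),
        if_pos (show arr.getD 0 0 = x from hgetD0),
        if_neg (show ¬((0 : Int) = -1 ∨ PySem.List.pyGet? arr (0 : Int) ≠ some x) by
          simp [hget0]),
        if_neg (show ¬((0 : Int) < 0) by norm_num)]
    have hs := scanEnd_start arr x 0 (arr.length + 1) hlen (by omega)
        (by rw [Nat.cast_zero]; exact hget0)
    simp only [Nat.cast_zero] at hs
    rw [hs]
    simp [Int.ofNat_eq_natCast]
  · rw [if_neg (show ¬ PySem.List.pyGet? arr 0 = some t by simp [hget0]; exact h0),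
        if_neg (show ¬ arr.getD 0 0 = t by rw [hgetD0]; exact h0)]
    have hloop : findStartLoop arr t (arr.length + 1) 0 ((PySem.List.len arr) - 1)
        = searchB arr t (arr.length + 1) 0 arr.length := by
      have h := findStartLoop_eq_searchB arr t arr.length (arr.length + 1) (arr.length + 1) 0
          (by omega) (by omega)
      simpa [PySem.List.len_eq] using h
    rw [hloop]
    by_cases hs : searchB arr t (arr.length + 1) 0 arr.length = -1
    · rw [if_pos (Or.inl hs :
            searchB arr t (arr.length + 1) 0 arr.length = -1 ∨
              PySem.List.pyGet? arr (searchB arr t (arr.length + 1) 0 arr.length) ≠ some t),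
          if_pos (show searchB arr t (arr.length + 1) 0 arr.length < 0 by omega)]
    · obtain ⟨m, hm, hmlt, hmget⟩ := searchB_some arr t arr.length (arr.length + 1) 0
          (by omega) (by omega) hs
      rw [hm,
          if_neg (show ¬(((m : Nat) : Int) = -1 ∨ PySem.List.pyGet? arr ((m : Nat) : Int) ≠ some t) from
            fun hor => hor.elim (by omega) (fun hne => hne hmget)),
          if_neg (show ¬(((m : Nat) : Int) < 0) by omega)]
      have hE := scanEnd_start arr t m (arr.length + 1) hmlt (by omega) hmget
      rw [hE]
      simp [Int.ofNat_eq_natCast]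

-- ===== VERDICT (by name: the statement is the Claim_ definition above) =====
theorem validAnagramBinary_spec : Claim_equal_validAnagramBinary := by
  intro arr t _hdom hpre
  unfold Spec_validAnagramBinary
  exact validAnagramBinary_eq_alt arr t hpre
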